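-- pv_equiv track=rewrite | github.com/shengolkar28/eduguide | backend/app.py | pick_format_hint
-- ===== SOURCE A (Python) =====
-- def pick_format_hint(learning_formats):
--     """
--     Simple heuristic based on user's preferred learning formats.
--     Adjust strings to match whatever you actually store.
--     """
--     if not learning_formats:
--         return "Use a mix of video, text, and projects."
--
--     lf = [str(s).lower() for s in learning_formats]
--
--     if any("video" in s for s in lf):
--         return "Prefer video courses and recorded lectures."
--     if any("project" in s or "hands-on" in s for s in lf):
--         return "Prefer project-based resources and practical tasks."
--     if any("text" in s or "reading" in s for s in lf):
--         return "Prefer articles, documentation, and books."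
--
--     return "Use a mix of video, text, and projects."
-- ===== SOURCE B (Python) =====
-- def pick_format_hint(learning_formats):
--     """One pass over the formats collecting three flags, then a priority pick."""
--     if not learning_formats:
--         return "Use a mix of video, text, and projects."
--
--     video = project = text = False
--     for item in learning_formats:
--         s = str(item).lower()
--         video = video or "video" in s
--         project = project or "project" in s or "hands-on" in s
--         text = text or "text" in s or "reading" in s
--
--     if video:
--         return "Prefer video courses and recorded lectures."
--     if project:
--         return "Prefer project-based resources and practical tasks."
--     if text:
--         return "Prefer articles, documentation, and books."
--     return "Use a mix of video, text, and projects."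
-- ===== Notes on version B (the rewrite author's own statement) =====
-- stated objective: alternative
-- what changed: Replaces the lowered intermediate list plus three separate lazy any-scans with a single fold over the input that computes the three keyword flags in one pass, followed by a priority pick.
import Mathlib
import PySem

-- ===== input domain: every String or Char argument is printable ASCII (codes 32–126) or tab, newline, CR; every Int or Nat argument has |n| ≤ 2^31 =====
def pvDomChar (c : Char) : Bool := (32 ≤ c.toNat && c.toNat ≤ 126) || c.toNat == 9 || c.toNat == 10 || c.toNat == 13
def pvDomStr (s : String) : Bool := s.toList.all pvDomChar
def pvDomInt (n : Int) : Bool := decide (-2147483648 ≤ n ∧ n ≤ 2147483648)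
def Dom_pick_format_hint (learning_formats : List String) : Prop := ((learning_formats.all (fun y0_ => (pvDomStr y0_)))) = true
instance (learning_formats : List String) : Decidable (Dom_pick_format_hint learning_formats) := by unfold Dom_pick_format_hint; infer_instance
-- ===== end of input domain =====

-- B changes the traversal: one fold computing three keyword flags instead of a lowered list and three lazy any-scans (objective: alternative).

-- ===== PORT A =====
def pick_format_hint (learning_formats : List String) : String :=
  if learning_formats = [] then "Use a mix of video, text, and projects."
  else
    let lf := learning_formats.map (fun s => PySem.Str.lower s)
    if lf.any (fun s => PySem.Str.isIn "video" s) then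
      "Prefer video courses and recorded lectures."
    else if lf.any (fun s => PySem.Str.isIn "project" s || PySem.Str.isIn "hands-on" s) then
      "Prefer project-based resources and practical tasks."
    else if lf.any (fun s => PySem.Str.isIn "text" s || PySem.Str.isIn "reading" s) then
      "Prefer articles, documentation, and books."
    else "Use a mix of video, text, and projects."

-- ===== PORT B =====
def pick_format_hint_alt (learning_formats : List String) : String :=
  if learning_formats = [] then "Use a mix of video, text, and projects."
  else
    let flags := learning_formats.foldl
      (fun (acc : Bool × Bool × Bool) item =>
        let s := PySem.Str.lower item
        (acc.1 || PySem.Str.isIn "video" s,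
         acc.2.1 || PySem.Str.isIn "project" s || PySem.Str.isIn "hands-on" s,
         acc.2.2 || PySem.Str.isIn "text" s || PySem.Str.isIn "reading" s))
      (false, false, false)
    if flags.1 then "Prefer video courses and recorded lectures."
    else if flags.2.1 then "Prefer project-based resources and practical tasks."
    else if flags.2.2 then "Prefer articles, documentation, and books."
    else "Use a mix of video, text, and projects."

-- ===== PRECONDITION & SPEC =====
def Spec_pick_format_hint (learning_formats : List String) (out : String) : Prop := out = pick_format_hint_alt learning_formats
instance (learning_formats : List String) (out : String) : Decidable (Spec_pick_format_hint learning_formats out) := by unfold Spec_pick_format_hint; infer_instance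

-- ===== CLAIM (what is proved, stated in full; the proofs are below) =====
def Claim_equal_pick_format_hint : Prop := ∀ (learning_formats : List String), Dom_pick_format_hint learning_formats → Spec_pick_format_hint learning_formats (pick_format_hint learning_formats)

-- ===== LEMMAS AND PROOFS =====

-- B's fold computes exactly the three any-scans of A (with the given initial flags or-ed in).
theorem pick_flags_fold (xs : List String) (a b c : Bool) :
    xs.foldl
      (fun (acc : Bool × Bool × Bool) item =>
        let s := PySem.Str.lower item
        (acc.1 || PySem.Str.isIn "video" s,
         acc.2.1 || PySem.Str.isIn "project" s || PySem.Str.isIn "hands-on" s,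
         acc.2.2 || PySem.Str.isIn "text" s || PySem.Str.isIn "reading" s))
      (a, b, c)
    = (a || xs.any (fun x => PySem.Str.isIn "video" (PySem.Str.lower x)),
       b || xs.any (fun x => PySem.Str.isIn "project" (PySem.Str.lower x) || PySem.Str.isIn "hands-on" (PySem.Str.lower x)),
       c || xs.any (fun x => PySem.Str.isIn "text" (PySem.Str.lower x) || PySem.Str.isIn "reading" (PySem.Str.lower x))) := by
  induction xs generalizing a b c with
  | nil => simp
  | cons x xs ih =>
    simp only [List.foldl_cons, List.any_cons, ih]
    simp [Bool.or_assoc]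

-- ===== VERDICT (by name: the statement is the Claim_ definition above) =====
theorem pick_format_hint_spec : Claim_equal_pick_format_hint := by
  intro lfs _
  unfold Spec_pick_format_hint pick_format_hint pick_format_hint_alt
  by_cases h : lfs = []
  · simp [h]
  · rw [pick_flags_fold]
    simp [h, List.any_map, Function.comp_def]
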